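-- pv_equiv track=rewrite | github.com/zhuxiangqun/aiPlatform | aiPlat-core/core/harness/restatement/run_state.py | pick_next_todo
-- ===== SOURCE A (Python) =====
-- from typing import Any, Dict, List, Optional
--
-- def _severity_rank(sev: str) -> int:
--     s = (sev or "").strip().upper()
--     if s == "P0":
--         return 0
--     if s == "P1":
--         return 1
--     if s == "P2":
--         return 2
--     return 9
--
-- def _todo_status_rank(st: str) -> int:
--     s = (st or "").strip().lower()
--     if s in {"pending", "todo", "open"}:
--         return 0
--     if s in {"in_progress", "doing"}:
--         return 1
--     if s in {"done", "completed"}: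
--         return 9
--     return 5
--
-- def pick_next_todo(todo: List[Dict[str, Any]]) -> Optional[Dict[str, Any]]:
--     """
--     Pick the highest-priority unfinished todo.
--     """
--     items = [t for t in (todo or []) if isinstance(t, dict)]
--     unfinished = [t for t in items if str(t.get("status") or "").lower() not in {"done", "completed"}]
--     if not unfinished:
--         return None
--     unfinished.sort(
--         key=lambda x: (
--             _severity_rank(str(x.get("priority") or "")),
--             _todo_status_rank(str(x.get("status") or "")),
--             str(x.get("title") or ""),
--         )
--     )
--     return unfinished[0]
-- ===== SOURCE B (Python) =====
-- def _sev_rank(sev):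
--     return {"P0": 0, "P1": 1, "P2": 2}.get((sev or "").strip().upper(), 9)
--
--
-- def _st_rank(st):
--     s = (st or "").strip().lower()
--     if s in ("pending", "todo", "open"):
--         return 0
--     if s in ("in_progress", "doing"):
--         return 1
--     if s in ("done", "completed"):
--         return 9
--     return 5
--
--
-- def pick_next_todo(todo):
--     """Pick the highest-priority unfinished todo in one linear pass."""
--     best = None
--     best_key = None
--     for t in (todo or []):
--         if not isinstance(t, dict):
--             continue
--         if str(t.get("status") or "").lower() in ("done", "completed"):
--             continue
--         key = (
--             _sev_rank(str(t.get("priority") or "")),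
--             _st_rank(str(t.get("status") or "")),
--             str(t.get("title") or ""),
--         )
--         if best is None or key < best_key:
--             best, best_key = t, key
--     return best
-- ===== Notes on version B (the rewrite author's own statement) =====
-- stated objective: alternative
-- what changed: Replaces A's two filter list-comprehensions plus a full stable sort and [0] indexing with a single linear pass that keeps a running best item and best key, using strict '<' so the first item among equal keys wins exactly like the stable sort's first minimum.
import Mathlib
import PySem

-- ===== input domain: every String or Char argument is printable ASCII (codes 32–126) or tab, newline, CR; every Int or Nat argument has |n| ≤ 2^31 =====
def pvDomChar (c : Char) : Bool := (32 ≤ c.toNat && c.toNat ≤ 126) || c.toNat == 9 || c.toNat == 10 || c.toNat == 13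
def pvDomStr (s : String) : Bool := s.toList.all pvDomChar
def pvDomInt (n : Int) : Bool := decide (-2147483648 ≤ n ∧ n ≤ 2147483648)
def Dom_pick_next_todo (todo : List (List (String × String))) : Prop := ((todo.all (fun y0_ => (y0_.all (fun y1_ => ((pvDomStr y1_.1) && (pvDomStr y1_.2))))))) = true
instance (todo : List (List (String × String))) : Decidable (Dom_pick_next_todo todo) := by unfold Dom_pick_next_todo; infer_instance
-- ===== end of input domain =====

-- B replaces A's two filter comprehensions + stable sort + [0] by one linear best/best_key accumulator pass (objective: alternative).
-- Return-value equivalence only; neither program observably mutates its argument (A sorts a fresh comprehension list).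

-- ===== PORT A =====
-- str(t.get(k) or ""): first-match lookup in the association list; None and "" both give "".
def pvGetS (t : List (String × String)) (k : String) : String :=
  ((t.find? (fun p => p.1 == k)).map (·.2)).getD ""

def pvSevRank (sev : String) : Int :=
  let s := PySem.Str.upper (PySem.Str.strip sev)
  if s = "P0" then 0
  else if s = "P1" then 1
  else if s = "P2" then 2
  else 9

def pvStRank (st : String) : Int :=
  let s := PySem.Str.lower (PySem.Str.strip st)
  if s = "pending" ∨ s = "todo" ∨ s = "open" then 0
  else if s = "in_progress" ∨ s = "doing" then 1
  else if s = "done" ∨ s = "completed" then 9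
  else 5

-- Python's '<' on the 3-tuple sort keys is the lexicographic order; spelled out because
-- Mathlib's default Prod '<' is the pointwise order (and its ×ₗ instances do not #eval)
def pvTupLt (k l : Int × Int × String) : Prop :=
  k.1 < l.1 ∨ (k.1 = l.1 ∧ (k.2.1 < l.2.1 ∨ (k.2.1 = l.2.1 ∧ k.2.2 < l.2.2)))
@[reducible] def pvLTinst : LT (Int × Int × String) := ⟨pvTupLt⟩
@[reducible] def pvDecLT : @DecidableRel (Int × Int × String) (Int × Int × String) pvTupLt :=
  fun a b => by unfold pvTupLt; infer_instance

-- the sort key tuple of A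
def pvKeyA (t : List (String × String)) : Int × Int × String :=
  (pvSevRank (pvGetS t "priority"), pvStRank (pvGetS t "status"), pvGetS t "title")

def pick_next_todo (todo : List (List (String × String))) : Option (List (String × String)) :=
  -- 'todo or []' is the identity on lists; 'isinstance(t, dict)' is always true under the type
  let items := todo
  let unfinished := items.filter (fun t =>
    let s := PySem.Str.lower (pvGetS t "status")
    !(s == "done" || s == "completed"))
  if unfinished.isEmpty then none
  else (@PySem.List.sorted _ _ pvLTinst pvDecLT unfinished pvKeyA false).head?
    -- unfinished[0] of the (nonempty) sorted list

-- ===== PORT B =====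
def pvSevRankB (sev : String) : Int :=
  PySem.Dict.getD (PySem.Dict.ofList [("P0", (0 : Int)), ("P1", 1), ("P2", 2)])
    (PySem.Str.upper (PySem.Str.strip sev)) 9

def pvStRankB (st : String) : Int :=
  let s := PySem.Str.lower (PySem.Str.strip st)
  if s = "pending" ∨ s = "todo" ∨ s = "open" then 0
  else if s = "in_progress" ∨ s = "doing" then 1
  else if s = "done" ∨ s = "completed" then 9
  else 5

def pvKeyB (t : List (String × String)) : Int × Int × String :=
  (pvSevRankB (pvGetS t "priority"), pvStRankB (pvGetS t "status"), pvGetS t "title")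

-- Python tuple comparison 'key < best_key', written out lexicographically
def pvKeyLt (k l : Int × Int × String) : Bool :=
  k.1 < l.1 || (k.1 == l.1 && (k.2.1 < l.2.1 || (k.2.1 == l.2.1 && k.2.2 < l.2.2)))

-- best and best_key travel together as one optional pair
def pick_next_todo_alt (todo : List (List (String × String))) : Option (List (String × String)) :=
  (todo.foldl (fun best t =>
      let s := PySem.Str.lower (pvGetS t "status")
      if s == "done" || s == "completed" then best
      else
        let key := pvKeyB t
        match best with
        | none => some (t, key)
        | some (b, bk) => if pvKeyLt key bk then some (t, key) else some (b, bk))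
    none).map (·.1)

-- ===== PRECONDITION & SPEC =====
def Spec_pick_next_todo (todo : List (List (String × String))) (out : Option (List (String × String))) : Prop := out = pick_next_todo_alt todo
instance (todo : List (List (String × String))) (out : Option (List (String × String))) : Decidable (Spec_pick_next_todo todo out) := by unfold Spec_pick_next_todo; infer_instance

-- ===== CLAIM (what is proved, stated in full; the proofs are below) =====
def Claim_equal_pick_next_todo : Prop := ∀ (todo : List (List (String × String))), Dom_pick_next_todo todo → Spec_pick_next_todo todo (pick_next_todo todo)

-- ===== LEMMAS AND PROOFS =====

-- the element-only first-minimum step that both A's sorted-head and B's fold reduce to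
def pvG (o : Option (List (String × String))) (t : List (String × String)) : Option (List (String × String)) :=
  match o with
  | none => some t
  | some h => if @decide _ (pvDecLT (pvKeyA t) (pvKeyA h)) then some t else some h

theorem pvSevRankB_eq (s : String) : pvSevRankB s = pvSevRank s := by
  unfold pvSevRankB pvSevRank
  generalize PySem.Str.upper (PySem.Str.strip s) = u
  have h : PySem.Dict.ofList [("P0", (0 : Int)), ("P1", 1), ("P2", 2)]
      = PySem.Dict.mk [("P0", 0), ("P1", 1), ("P2", 2)] := by rfl
  rw [h]
  simp only [PySem.Dict.getD, PySem.Dict.get?_mk_cons]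
  by_cases h0 : "P0" = u <;> by_cases h1 : "P1" = u <;> by_cases h2 : "P2" = u <;>
    simp_all [PySem.Dict.get?, ne_comm] <;> split_ifs <;> simp_all [ne_comm]

theorem pvKeyLt_iff (t x : List (String × String)) :
    pvKeyLt (pvKeyB t) (pvKeyB x) = true ↔ pvTupLt (pvKeyA t) (pvKeyA x) := by
  simp [pvKeyLt, pvTupLt, pvKeyB, pvKeyA, pvSevRankB_eq, pvStRankB, pvStRank]

theorem head?_insertBy (x : List (String × String)) (acc : List (List (String × String))) :
    (PySem.List.insertBy (fun a b => @decide _ (pvDecLT (pvKeyA a) (pvKeyA b))) x acc).head? =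
      (match acc.head? with
       | none => some x
       | some h => if @decide _ (pvDecLT (pvKeyA x) (pvKeyA h)) then some x else some h) := by
  cases acc with
  | nil => rfl
  | cons y ys =>
    simp only [PySem.List.insertBy, List.head?_cons]
    by_cases h : pvTupLt (pvKeyA x) (pvKeyA y) <;> simp [h]

theorem head?_foldl_insertBy (xs : List (List (String × String)))
    (acc : List (List (String × String))) :
    (xs.foldl (fun a x =>
        PySem.List.insertBy (fun a b => @decide _ (pvDecLT (pvKeyA a) (pvKeyA b))) x a) acc).head?
      = xs.foldl pvG acc.head? := by
  induction xs generalizing acc with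
  | nil => rfl
  | cons x xs ih =>
    simp only [List.foldl_cons]
    rw [ih, head?_insertBy]
    rfl

theorem foldl_pair_fst (u : List (List (String × String)))
    (b : Option (List (String × String))) :
    (u.foldl (fun best t =>
        let key := pvKeyB t
        match best with
        | none => some (t, key)
        | some (bb, bk) => if pvKeyLt key bk then some (t, key) else some (bb, bk))
      (b.map (fun x => (x, pvKeyB x)))).map (·.1)
      = u.foldl pvG b := by
  induction u generalizing b with
  | nil => cases b <;> rfl
  | cons t u ih =>
    simp only [List.foldl_cons]
    cases b with
    | none => exact ih (some t)
    | some x =>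
      simp only [Option.map_some]
      by_cases h : pvTupLt (pvKeyA t) (pvKeyA x)
      · have hb : pvKeyLt (pvKeyB t) (pvKeyB x) = true := (pvKeyLt_iff t x).mpr h
        simpa [hb, pvG, h] using ih (some t)
      · have hb : pvKeyLt (pvKeyB t) (pvKeyB x) = false := by
          rw [Bool.eq_false_iff]
          exact fun hh => h ((pvKeyLt_iff t x).mp hh)
        simpa [hb, pvG, h] using ih (some x)

-- ===== VERDICT (by name: the statement is the Claim_ definition above) =====
theorem pick_next_todo_spec : Claim_equal_pick_next_todo := by
  intro todo _
  unfold Spec_pick_next_todo pick_next_todo pick_next_todo_alt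
  set p : List (String × String) → Bool := fun t =>
    let s := PySem.Str.lower (pvGetS t "status")
    !(s == "done" || s == "completed") with hp
  -- B's skipping fold over todo is the updating fold over A's filtered list
  have hstep : (fun (best : Option (List (String × String) × (Int × Int × String))) t =>
        let s := PySem.Str.lower (pvGetS t "status")
        if s == "done" || s == "completed" then best
        else
          let key := pvKeyB t
          match best with
          | none => some (t, key)
          | some (b, bk) => if pvKeyLt key bk then some (t, key) else some (b, bk))
      = (fun best t => if p t then
          (let key := pvKeyB t
           match best with
           | none => some (t, key)
           | some (b, bk) => if pvKeyLt key bk then some (t, key) else some (b, bk))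
          else best) := by
    funext best t
    by_cases h : (PySem.Str.lower (pvGetS t "status") == "done"
        || PySem.Str.lower (pvGetS t "status") == "completed") = true
    · rw [if_pos h, if_neg (by simp [hp]; simp at h; tauto)]
    · rw [if_neg h, if_pos (by simp [hp] at h ⊢; exact h)]
  rw [hstep, ← List.foldl_filter]
  have hB := foldl_pair_fst (todo.filter p) none
  simp only [Option.map_none] at hB
  rw [hB]
  -- A's sorted head is the same first-minimum fold
  have hA : (@PySem.List.sorted _ _ pvLTinst pvDecLT (todo.filter p) pvKeyA false).head?
      = (todo.filter p).foldl pvG none := by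
    rw [@PySem.List.sorted_eq_foldl_insertBy _ _ pvLTinst pvDecLT (todo.filter p) pvKeyA]
    simpa using head?_foldl_insertBy (todo.filter p) []
  by_cases he : (todo.filter p).isEmpty
  · have h0 : todo.filter p = [] := by simpa [List.isEmpty_iff] using he
    simp [h0]
  · simp only [he, Bool.false_eq_true, if_false]
    exact hA
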